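-- pv_equiv track=rewrite | github.com/ynsung/algorithms_practice | BaekJoon/silver_1/1527.py | minsu
-- ===== SOURCE A (Python) =====
-- def minsu(num):
--     cnt = 0
--     tmp = 0
--     for i in range(1, len(num)):
--         cnt += 2**i
--
--     for i in range(0, len(num)):
--         if num[i]=='7':
--             tmp += 2**(len(num)-1-i)
--             if i == len(num)-1:
--                 tmp += 1
--         elif num[i]>'7':
--             tmp += 2**(len(num)-i)
--             break
--         elif num[i]<'4':
--             break
--         elif num[i]=='5' or num[i]=='6':
--             tmp += 2**(len(num)-1-i)
--             break
--         else:
--             if i == len(num)-1: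
--                 tmp += 1
--     return int(cnt+tmp)
-- ===== SOURCE B (Python) =====
-- # B: one right-to-left fold maintaining (g, p): g = lucky strings of suffix length <= suffix, p = 2^suffix length; answer p - 2 + g. No break, no index arithmetic, handles "" with no special case.
-- def minsu(num):
--     g, p = 1, 1
--     for c in reversed(num):
--         g = ((c > '4') + (c > '7')) * p + (g if c in '47' else 0)
--         p *= 2
--     return p - 2 + g
-- ===== Notes on version B (the rewrite author's own statement) =====
-- stated objective: alternative
-- what changed: Replaces A's two staged left-to-right loops (geometric-sum loop plus a five-branch scan with break and last-index special cases) by a single right-to-left fold over the digits maintaining the pair (count of lucky suffixes <= current suffix, power of two), with no break, no index arithmetic and no empty-string special case.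
import Mathlib
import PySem

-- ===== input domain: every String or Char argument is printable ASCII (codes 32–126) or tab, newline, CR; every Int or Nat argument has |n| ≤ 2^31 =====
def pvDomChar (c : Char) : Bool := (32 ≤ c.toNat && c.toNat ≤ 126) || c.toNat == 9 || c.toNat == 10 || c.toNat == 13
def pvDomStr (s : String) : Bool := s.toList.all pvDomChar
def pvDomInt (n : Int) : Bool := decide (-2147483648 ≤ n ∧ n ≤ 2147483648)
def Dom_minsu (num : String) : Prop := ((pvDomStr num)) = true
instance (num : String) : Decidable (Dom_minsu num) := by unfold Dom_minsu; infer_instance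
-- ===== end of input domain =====

-- B (minsu_alt) replaces A's two staged left-to-right loops by a single right-to-left fold maintaining (count of lucky suffixes ≤ suffix, power of two); alternative decomposition, same cost.


-- ===== PORT A =====
-- loop2A ports A's second for-loop (index i over the suffix s of num.toList; break = stop recursion).
def loop2A (n : Nat) : List Char → Nat → Int
  | [], _ => 0
  | c :: rest, i =>
    if c = '7' then
      (2 ^ (n - 1 - i) : Int) + (if i = n - 1 then 1 else 0) + loop2A n rest (i + 1)
    else if c > '7' then (2 ^ (n - i) : Int)
    else if c < '4' then 0
    else if c = '5' ∨ c = '6' then (2 ^ (n - 1 - i) : Int)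
    else (if i = n - 1 then 1 else 0) + loop2A n rest (i + 1)

-- exponents 2**i in the first loop use i ≥ 1 from range(1, len), so i.toNat is exact
def minsu (num : String) : Int :=
  let s := num.toList
  let cnt : Int := (PySem.List.pyRange 1 (s.length : Int) 1).foldl (fun c i => c + 2 ^ i.toNat) 0
  let tmp : Int := loop2A s.length s 0
  cnt + tmp

-- ===== PORT B =====
-- Source B's loop body: state (g, p), one step per character, taken right-to-left via reverse.
def stepB (gp : Int × Int) (c : Char) : Int × Int :=
  (((if c > '4' then 1 else 0) + (if c > '7' then 1 else 0)) * gp.2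
     + (if c = '4' ∨ c = '7' then gp.1 else 0),
   gp.2 * 2)

def minsu_alt (num : String) : Int :=
  let gp := num.toList.reverse.foldl stepB (1, 1)
  gp.2 - 2 + gp.1

-- ===== PRECONDITION & SPEC =====
def Spec_minsu (num : String) (out : Int) : Prop := out = minsu_alt num
instance (num : String) (out : Int) : Decidable (Spec_minsu num out) := by unfold Spec_minsu; infer_instance

-- ===== CLAIM (what is proved, stated in full; the proofs are below) =====
def Claim_equal_minsu : Prop := ∀ (num : String), Dom_minsu num → Spec_minsu num (minsu num)

-- ===== LEMMAS AND PROOFS =====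
-- gfun s = number of lucky strings of length |s| that are ≤ s (the invariant of B's fold).
def gfun : List Char → Int
  | [] => 1
  | c :: rest =>
    ((if c > '4' then 1 else 0) + (if c > '7' then 1 else 0)) * 2 ^ rest.length
      + (if c = '4' ∨ c = '7' then gfun rest else 0)

theorem foldB_eq (s : List Char) :
    s.reverse.foldl stepB (1, 1) = (gfun s, 2 ^ s.length) := by
  induction s with
  | nil => simp [gfun]
  | cons c rest ih =>
    simp only [List.reverse_cons, List.foldl_append, ih, List.foldl_cons, List.foldl_nil]
    simp [stepB, gfun]
    ring

theorem sum_pow_aux (m : Nat) :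
    (((List.range m).map (fun k : Nat => (1:Int) + (k:Int))).foldl (fun c i => c + 2 ^ i.toNat) 0 : Int)
      = 2 ^ (m + 1) - 2 := by
  induction m with
  | zero => simp
  | succ m ih =>
    rw [List.range_succ, List.map_append, List.foldl_append, ih]
    have h1 : ((1:Int) + m).toNat = m + 1 := by omega
    simp only [List.map_cons, List.map_nil, List.foldl_cons, List.foldl_nil, h1]
    ring

theorem sum_pow_range (n : Nat) :
    ((PySem.List.pyRange 1 (n : Int) 1).foldl (fun c i => c + 2 ^ i.toNat) 0 : Int)
      = if n = 0 then 0 else 2 ^ n - 2 := by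
  rw [PySem.List.pyRange_one]
  cases n with
  | zero => simp
  | succ m =>
    have h1 : ((m + 1 : Nat) - (1:Int)).toNat = m := by omega
    rw [show ((m + 1 : Nat) : Int) = ((m:Nat):Int) + 1 by push_cast; ring]
    simp only [add_sub_cancel_right, Int.toNat_natCast]
    rw [sum_pow_aux m]
    simp

theorem between_is_56 (c : Char) (h1 : '4' < c) (h2 : c < '7') : c = '5' ∨ c = '6' := by
  rcases c with ⟨v, hv⟩
  simp [Char.lt_def, UInt32.lt_iff_toNat_lt] at h1 h2
  rcases v with ⟨⟨v, hv2⟩⟩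
  simp at h1 h2
  interval_cases v <;> simp [Char.ext_iff]

theorem loop2_eq_gfun (n : Nat) (s : List Char) (i : Nat) (hs : s ≠ []) (hn : i + s.length = n) :
    loop2A n s i = gfun s := by
  induction s generalizing i with
  | nil => exact absurd rfl hs
  | cons c rest ih =>
    have hlr : n - 1 - i = rest.length := by simp at hn; omega
    simp only [loop2A, gfun]
    by_cases h7 : c = '7'
    · cases rest with
      | nil =>
        have hi : i = n - 1 := by simp at hn; omega
        simp [h7, hi, gfun, loop2A]
      | cons d t =>
        have hi : i ≠ n - 1 := by simp at hn; omega
        rw [ih (i + 1) (by simp) (by simp at hn ⊢; omega)]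
        simp [h7, hi, hlr]
    · by_cases h4 : c = '4'
      · cases rest with
        | nil =>
          have hi : i = n - 1 := by simp at hn; omega
          simp [h4, hi, gfun, loop2A]
        | cons d t =>
          have hi : i ≠ n - 1 := by simp at hn; omega
          rw [ih (i + 1) (by simp) (by simp at hn ⊢; omega)]
          simp [h4, hi]
      · by_cases hgt : '7' < c
        · have h4c : '4' < c := lt_trans (by decide) hgt
          have hni : n - i = rest.length + 1 := by simp at hn; omega
          simp [h7, h4, hgt, h4c, hni]
          ring
        · by_cases hlt : c < '4'
          · have hc7 : c < '7' := lt_trans hlt (by decide)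
            simp [h7, h4, hgt, hlt, not_lt.mpr (le_of_lt hlt)]
          · have h4c : '4' < c := lt_of_le_of_ne (not_lt.mp hlt) (Ne.symm h4)
            have hc7 : c < '7' := lt_of_le_of_ne (not_lt.mp hgt) h7
            have h56 : c = '5' ∨ c = '6' := between_is_56 c h4c hc7
            rcases h56 with h5 | h6
            · simp [h5, hlr]
            · simp [h6, hlr]

-- ===== VERDICT (by name: the statement is the Claim_ definition above) =====
theorem minsu_spec : Claim_equal_minsu := by
  intro num _
  unfold Spec_minsu minsu minsu_alt
  rw [foldB_eq]
  by_cases h : num.toList = []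
  · simp [h, loop2A, gfun, PySem.List.pyRange]
  · simp only [sum_pow_range, loop2_eq_gfun num.toList.length num.toList 0 h (by simp)]
    have hL : num.toList.length ≠ 0 := by simpa [List.length_eq_zero_iff] using h
    simp only [hL, if_false]
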